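-- pv_equiv track=rewrite | github.com/jsheunis/datalad-concepts | tools/dataverse_to_datasetversion.py | find_duplicate_object_in_list
-- ===== SOURCE A (Python) =====
-- def find_duplicate_object_in_list(
--     list_to_search: list, new_obj: object, keys_to_match
-- ):
--     """"""
--     existing_objects = list_to_search
--     for key in keys_to_match:
--         existing_objects = [
--             obj
--             for obj in existing_objects
--             if (key in new_obj) and (key in obj) and (obj[key] == new_obj[key])
--         ]
--
--     if not bool(existing_objects):
--         return None
--     else:
--         return existing_objects[0]
-- ===== SOURCE B (Python) =====
-- def find_duplicate_object_in_list(
--     list_to_search: list, new_obj: object, keys_to_match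
-- ):
--     """Precompute the required (key, value) pairs from new_obj once; if any key is
--     missing from new_obj nothing can match, so return None immediately; otherwise
--     scan list_to_search once and return the first object carrying all those pairs."""
--     targets = []
--     for key in keys_to_match:
--         if key not in new_obj:
--             return None
--         targets.append((key, new_obj[key]))
--     for obj in list_to_search:
--         if all(key in obj and obj[key] == val for key, val in targets):
--             return obj
--     return None
-- ===== Notes on version B (the rewrite author's own statement) =====
-- stated objective: simpler
-- what changed: Instead of k progressive filter passes over the whole list, B precomputes once the required (key,value) pairs from new_obj (returning None immediately if a key is absent, since then no object can survive A's filters) and then makes a single early-returning scan of list_to_search for the first object carrying all those pairs.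
import Mathlib
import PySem

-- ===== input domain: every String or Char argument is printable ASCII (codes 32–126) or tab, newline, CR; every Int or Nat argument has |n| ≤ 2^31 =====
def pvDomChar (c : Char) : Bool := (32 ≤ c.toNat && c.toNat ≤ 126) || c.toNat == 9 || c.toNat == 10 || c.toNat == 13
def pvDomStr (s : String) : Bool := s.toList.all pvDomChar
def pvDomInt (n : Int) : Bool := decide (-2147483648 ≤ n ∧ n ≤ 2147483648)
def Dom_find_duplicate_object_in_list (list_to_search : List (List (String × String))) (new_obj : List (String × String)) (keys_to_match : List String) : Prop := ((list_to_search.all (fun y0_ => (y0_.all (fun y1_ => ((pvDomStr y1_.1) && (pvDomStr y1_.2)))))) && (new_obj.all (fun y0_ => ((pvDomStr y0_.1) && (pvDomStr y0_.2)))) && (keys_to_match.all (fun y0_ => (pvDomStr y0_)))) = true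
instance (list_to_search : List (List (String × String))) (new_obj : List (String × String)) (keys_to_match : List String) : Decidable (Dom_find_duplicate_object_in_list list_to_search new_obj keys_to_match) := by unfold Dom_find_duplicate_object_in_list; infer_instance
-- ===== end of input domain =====

-- B replaces A's k progressive filter passes by a one-time precomputation of the
-- required (key,value) pairs from new_obj plus a single early-returning scan (simpler).

-- shared primitive: Python's 'key in d' / 'd[key]' on an association-list dict (first match)
def pvLookup (obj : List (String × String)) (key : String) : Option String :=
  (obj.find? (fun p => p.1 == key)).map (fun p => p.2)

-- ===== PORT A =====
-- literal port of A: progressively filter existing_objects once per key, then head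
def find_duplicate_object_in_list (list_to_search : List (List (String × String))) (new_obj : List (String × String)) (keys_to_match : List String) : Option (List (String × String)) :=
  let existing_objects :=
    keys_to_match.foldl
      (fun existing_objects key =>
        existing_objects.filter (fun obj =>
          (pvLookup new_obj key).isSome && (pvLookup obj key).isSome &&
            (pvLookup obj key == pvLookup new_obj key)))
      list_to_search
  existing_objects.head?

-- ===== PORT B =====
-- first loop of Source B: collect (key, new_obj[key]) pairs, none = the early 'return None'
def pvTargets (new_obj : List (String × String)) : List String → Option (List (String × String))
  | [] => some []
  | key :: ks =>
    match pvLookup new_obj key with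
    | none => none
    | some v => (pvTargets new_obj ks).map (fun ts => (key, v) :: ts)

-- second loop of Source B: first object carrying all target pairs
def pvScan (targets : List (String × String)) : List (List (String × String)) → Option (List (String × String))
  | [] => none
  | obj :: rest =>
    if targets.all (fun kv => pvLookup obj kv.1 == some kv.2) then some obj
    else pvScan targets rest

def find_duplicate_object_in_list_alt (list_to_search : List (List (String × String))) (new_obj : List (String × String)) (keys_to_match : List String) : Option (List (String × String)) :=
  match pvTargets new_obj keys_to_match with
  | none => none
  | some targets => pvScan targets list_to_search

-- ===== PRECONDITION & SPEC =====
def Spec_find_duplicate_object_in_list (list_to_search : List (List (String × String))) (new_obj : List (String × String)) (keys_to_match : List String) (out : Option (List (String × String))) : Prop := out = find_duplicate_object_in_list_alt list_to_search new_obj keys_to_match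
instance (list_to_search : List (List (String × String))) (new_obj : List (String × String)) (keys_to_match : List String) (out : Option (List (String × String))) : Decidable (Spec_find_duplicate_object_in_list list_to_search new_obj keys_to_match out) := by unfold Spec_find_duplicate_object_in_list; infer_instance

-- ===== CLAIM (what is proved, stated in full; the proofs are below) =====
def Claim_equal_find_duplicate_object_in_list : Prop := ∀ (list_to_search : List (List (String × String))) (new_obj : List (String × String)) (keys_to_match : List String), Dom_find_duplicate_object_in_list list_to_search new_obj keys_to_match → Spec_find_duplicate_object_in_list list_to_search new_obj keys_to_match (find_duplicate_object_in_list list_to_search new_obj keys_to_match)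

-- ===== LEMMAS AND PROOFS =====

-- A's predicate for one key
def pvP (new_obj : List (String × String)) (key : String) (obj : List (String × String)) : Bool :=
  (pvLookup new_obj key).isSome && (pvLookup obj key).isSome &&
    (pvLookup obj key == pvLookup new_obj key)

-- A's filter cascade is one filter by the conjunction of all keys
theorem pv_foldl_filter (new_obj : List (String × String)) :
    ∀ (keys : List String) (l : List (List (String × String))),
      keys.foldl (fun acc key => acc.filter (pvP new_obj key)) l
        = l.filter (fun o => keys.all (fun k => pvP new_obj k o)) := by
  intro keys
  induction keys with
  | nil => intro l; simp
  | cons k ks ih =>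
    intro l
    simp only [List.foldl_cons, ih, List.filter_filter, List.all_cons]
    congr 1
    funext o
    exact Bool.and_comm _ _

-- if some key is missing from new_obj (pvTargets = none), the conjunction is false
theorem pv_targets_none (new_obj : List (String × String)) :
    ∀ (keys : List String), pvTargets new_obj keys = none →
      ∀ o, keys.all (fun k => pvP new_obj k o) = false := by
  intro keys
  induction keys with
  | nil => intro h; simp [pvTargets] at h
  | cons k ks ih =>
    intro h o
    unfold pvTargets at h
    cases hk : pvLookup new_obj k with
    | none => simp [List.all_cons, pvP, hk]
    | some v =>
      rw [hk] at h
      cases hts : pvTargets new_obj ks with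
      | none => simp [List.all_cons, ih hts o]
      | some ts => simp [hts] at h

-- if pvTargets = some ts, the conjunction equals matching all target pairs
theorem pv_targets_some (new_obj : List (String × String)) :
    ∀ (keys : List String) (ts : List (String × String)),
      pvTargets new_obj keys = some ts →
      ∀ o, keys.all (fun k => pvP new_obj k o)
            = ts.all (fun kv => pvLookup o kv.1 == some kv.2) := by
  intro keys
  induction keys with
  | nil => intro ts h o; simp [pvTargets] at h; subst h; simp
  | cons k ks ih =>
    intro ts h o
    unfold pvTargets at h
    cases hk : pvLookup new_obj k with
    | none => rw [hk] at h; simp at h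
    | some v =>
      rw [hk] at h
      cases hts : pvTargets new_obj ks with
      | none => simp [hts] at h
      | some ts' =>
        simp [hts] at h
        subst h
        simp only [List.all_cons, ih ts' hts o]
        congr 1
        unfold pvP
        rw [hk]
        cases ho : pvLookup o k <;> simp [BEq.comm]

-- the scan is find? of the pair-matching predicate
theorem pv_scan_find (ts : List (String × String)) :
    ∀ (l : List (List (String × String))),
      pvScan ts l = l.find? (fun o => ts.all (fun kv => pvLookup o kv.1 == some kv.2)) := by
  intro l
  induction l with
  | nil => simp [pvScan]
  | cons o rest ih =>
    unfold pvScan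
    by_cases h : ts.all (fun kv => pvLookup o kv.1 == some kv.2) = true
    · simp [h, List.find?_cons_of_pos]
    · simp only [Bool.not_eq_true] at h
      simp [h, List.find?_cons_of_neg, ih]

-- ===== VERDICT (by name: the statement is the Claim_ definition above) =====
theorem find_duplicate_object_in_list_spec : Claim_equal_find_duplicate_object_in_list := by
  intro l n ks _
  unfold Spec_find_duplicate_object_in_list find_duplicate_object_in_list find_duplicate_object_in_list_alt
  show (ks.foldl (fun acc key => acc.filter (pvP n key)) l).head? = _
  rw [pv_foldl_filter]
  cases hts : pvTargets n ks with
  | none =>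
    show _ = (none : Option (List (String × String)))
    simp [fun o => pv_targets_none n ks hts o]
  | some ts =>
    show _ = pvScan ts l
    rw [pv_scan_find]
    rw [List.head?_filter]
    congr 1
    funext o
    exact pv_targets_some n ks ts hts o
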